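-- pv_equiv track=rewrite | github.com/HenrySprueill/rhana | rhana/spectrum.py | get_all_nbr_idxs
-- ===== SOURCE A (Python) =====
-- def get_all_nbr_idxs(center_i, idxs):
--     """
--         examples
--
--         center_i = 3
--         idx = 0, 1, 2, 3, 4,
--
--         what it yields in order:
--             2, 4, 1, 0
--     """
--     level = 0
--     endleft = False
--     endright = False
--     maxidx = max(idxs)
--
--     while not (endleft and endright):
--         level = level + 1
--         if center_i - level >= 0:
--             yield center_i - level
--         else:
--             endleft = True
--         if center_i + level <=maxidx:
--             yield center_i + level
--         else:
--             endright = True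
-- ===== SOURCE B (Python) =====
-- def get_all_nbr_idxs(center_i, idxs):
--     maxidx = max(idxs)
--     candidates = list(range(0, center_i)) + list(range(center_i + 1, maxidx + 1))
--     candidates.sort(key=lambda i: (abs(i - center_i), i))
--     for i in candidates:
--         yield i
-- ===== Notes on version B (the rewrite author's own statement) =====
-- stated objective: alternative
-- what changed: Replaces A's incremental interleaving loop (level counter, endleft/endright flags) by generate-then-sort: build all candidate indices range(0,center)+range(center+1,max+1) and sort them by the key (distance to center, index); Pre_ excludes only empty idxs, where both A and B raise ValueError from max(idxs).
import Mathlib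
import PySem

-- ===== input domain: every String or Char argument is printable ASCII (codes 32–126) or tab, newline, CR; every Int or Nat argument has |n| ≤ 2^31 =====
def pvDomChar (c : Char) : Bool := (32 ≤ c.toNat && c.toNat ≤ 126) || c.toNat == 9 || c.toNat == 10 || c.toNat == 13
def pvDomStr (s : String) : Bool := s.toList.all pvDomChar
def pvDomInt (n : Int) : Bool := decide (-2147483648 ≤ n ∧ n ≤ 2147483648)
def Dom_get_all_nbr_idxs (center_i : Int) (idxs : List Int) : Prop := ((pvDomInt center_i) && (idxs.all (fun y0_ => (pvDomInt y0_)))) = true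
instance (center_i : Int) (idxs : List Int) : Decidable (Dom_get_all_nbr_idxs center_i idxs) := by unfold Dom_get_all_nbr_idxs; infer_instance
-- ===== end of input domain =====

-- B replaces A's incremental interleaving loop by generate-then-sort: all candidate
-- indices, sorted by (distance to center, index) (objective: alternative).

-- ===== PORT A =====
-- the while loop of A: state = (level, endleft, endright); each iteration bumps level,
-- yields/flags the left side, then yields/flags the right side.
-- fuel is only a totality guard (structural recursion); get_all_nbr_idxs passes enough
-- fuel for the loop to run to completion (pvLoopA_eq_merge proves it).
def pvLoopA (c m : Int) : Int → Bool → Bool → Nat → List Int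
  | _, _, _, 0 => []
  | level, endleft, endright, fuel + 1 =>
    if endleft && endright then []
    else
      if c - (level + 1) ≥ 0 then
        if c + (level + 1) ≤ m then
          (c - (level + 1)) :: (c + (level + 1)) :: pvLoopA c m (level + 1) endleft endright fuel
        else
          (c - (level + 1)) :: pvLoopA c m (level + 1) endleft true fuel
      else
        if c + (level + 1) ≤ m then
          (c + (level + 1)) :: pvLoopA c m (level + 1) true endright fuel
        else
          pvLoopA c m (level + 1) true true fuel

-- A: maxidx = max(idxs) (ValueError on empty → Pre_), then the while loop from level 0
def get_all_nbr_idxs (center_i : Int) (idxs : List Int) : List Int :=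
  match PySem.List.max? idxs (fun x => x) with
  | none => []
  | some maxidx => pvLoopA center_i maxidx 0 false false ((center_i + 1).toNat + (maxidx + 1 - center_i).toNat + 2)

-- ===== PORT B =====
-- Source B: candidates = range(0, center_i) ++ range(center_i+1, maxidx+1),
-- sorted by the tuple key (abs(i - center_i), i)
def get_all_nbr_idxs_alt (center_i : Int) (idxs : List Int) : List Int :=
  match PySem.List.max? idxs (fun x => x) with
  | none => []
  | some maxidx =>
    PySem.List.sorted2
      (PySem.List.pyRange 0 center_i ++ PySem.List.pyRange (center_i + 1) (maxidx + 1))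
      (fun i => ((i - center_i).natAbs : Int)) (fun i => i)

-- ===== PRECONDITION & SPEC =====
-- Pre_ excludes only the empty list, on which Python A raises ValueError from max(idxs)
def Pre_get_all_nbr_idxs (center_i : Int) (idxs : List Int) : Prop := idxs ≠ []
instance (center_i : Int) (idxs : List Int) : Decidable (Pre_get_all_nbr_idxs center_i idxs) := by unfold Pre_get_all_nbr_idxs; infer_instance
def pvWitness_get_all_nbr_idxs : Int × List Int := (3, [0, 1, 2, 3, 4])

def Spec_get_all_nbr_idxs (center_i : Int) (idxs : List Int) (out : List Int) : Prop := out = get_all_nbr_idxs_alt center_i idxs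
instance (center_i : Int) (idxs : List Int) (out : List Int) : Decidable (Spec_get_all_nbr_idxs center_i idxs out) := by unfold Spec_get_all_nbr_idxs; infer_instance

-- ===== CLAIM (what is proved, stated in full; the proofs are below) =====
def Claim_equal_get_all_nbr_idxs : Prop := ∀ (center_i : Int) (idxs : List Int), Dom_get_all_nbr_idxs center_i idxs → Pre_get_all_nbr_idxs center_i idxs → Spec_get_all_nbr_idxs center_i idxs (get_all_nbr_idxs center_i idxs)

-- ===== LEMMAS AND PROOFS =====

-- the combined single-integer key equivalent to the lexicographic pair (|i-c|, i)
def pvK (c i : Int) : Int := 2 * ((i - c).natAbs : Int) + (if c < i then 1 else 0)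

-- the left-then-right interleaving of the two neighbour lists, as A's loop produces it
def pvMerge : List Int → List Int → List Int
  | [], [] => []
  | a :: l, [] => a :: pvMerge l []
  | [], b :: r => b :: pvMerge [] r
  | a :: l, b :: r => a :: b :: pvMerge l r

-- invariant: a raised flag means that side's condition already failed (and will fail forever);
-- fuel dominates the loop's remaining-work measure, so the fuel guard is never hit
lemma pvLoopA_eq_merge (c m : Int) (fuel : Nat) : ∀ (level : Int) (el er : Bool),
    (el = true → c - level - 1 < 0) → (er = true → m < c + level + 1) →
    (if el then 0 else (c + 1 - level).toNat + 1) + (if er then 0 else (m + 1 - c - level).toNat + 1) ≤ fuel →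
    pvLoopA c m level el er fuel =
      pvMerge (PySem.List.pyRange (c - level - 1) (-1) (-1))
              (PySem.List.pyRange (c + level + 1) (m + 1) 1) := by
  induction fuel with
  | zero =>
    intro level el er hl hr hf
    have hel : el = true := by cases el <;> simp_all
    have her : er = true := by cases er <;> simp_all
    rw [PySem.List.pyRange_neg_one_eq_nil (by have := hl hel; omega),
        PySem.List.pyRange_one_eq_nil (by have := hr her; omega), pvLoopA, pvMerge]
  | succ fuel ih =>
    intro level el er hl hr hf
    rw [pvLoopA]
    by_cases hg : el = true ∧ er = true
    · rw [if_pos (by simp [hg.1, hg.2]),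
          PySem.List.pyRange_neg_one_eq_nil (by have := hl hg.1; omega),
          PySem.List.pyRange_one_eq_nil (by have := hr hg.2; omega), pvMerge]
    · rw [if_neg (by simpa using fun a b => hg ⟨a, b⟩)]
      by_cases h2 : c - (level + 1) ≥ 0
      · rw [if_pos h2]
        have hel : el = false := by cases el; rfl; exact absurd (hl rfl) (by omega)
        by_cases h3 : c + (level + 1) ≤ m
        · have her : er = false := by cases er; rfl; exact absurd (hr rfl) (by omega)
          rw [if_pos h3, PySem.List.pyRange_neg_one_cons (by omega),
              PySem.List.pyRange_one_cons (by omega), pvMerge,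
              ih (level + 1) el er (by simp [hel]) (by simp [her])
                 (by simp only [hel, her, if_false, Bool.false_eq_true] at hf ⊢; omega)]
          norm_num
          ring_nf
          simp
        · rw [if_neg h3, PySem.List.pyRange_neg_one_cons (by omega),
              PySem.List.pyRange_one_eq_nil (by omega),
              ih (level + 1) el true (by simp [hel]) (fun _ => by omega)
                 (by cases er <;> simp [hel] at hf ⊢ <;> omega),
              PySem.List.pyRange_one_eq_nil (by omega), pvMerge]
          norm_num
          ring_nf
          simp
      · rw [if_neg h2]
        by_cases h3 : c + (level + 1) ≤ m
        · have her : er = false := by cases er; rfl; exact absurd (hr rfl) (by omega)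
          rw [if_pos h3, PySem.List.pyRange_neg_one_eq_nil (by omega),
              PySem.List.pyRange_one_cons (by omega),
              ih (level + 1) true er (fun _ => by omega) (by simp [her])
                 (by cases el <;> simp [her] at hf ⊢ <;> omega),
              PySem.List.pyRange_neg_one_eq_nil (by omega), pvMerge]
          norm_num
          ring_nf
          simp
        · rw [if_neg h3, PySem.List.pyRange_neg_one_eq_nil (by omega),
              PySem.List.pyRange_one_eq_nil (by omega),
              ih (level + 1) true true (fun _ => by omega) (fun _ => by omega)
                 (by simp),
              PySem.List.pyRange_neg_one_eq_nil (by omega),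
              PySem.List.pyRange_one_eq_nil (by omega)]

-- the tuple key (|i-c|, i) orders integers exactly like the single key pvK c,
-- so B's sorted2 is the single-key sort by pvK c
lemma sorted2_eq_sorted_pvK (c : Int) (xs : List Int) :
    PySem.List.sorted2 xs (fun i => ((i - c).natAbs : Int)) (fun i => i) =
      PySem.List.sorted xs (pvK c) := by
  unfold PySem.List.sorted2 PySem.List.sorted
  have hbefore : (fun (a b : Int) =>
      decide (((a - c).natAbs : Int) < ((b - c).natAbs : Int)) ||
        (!decide (((b - c).natAbs : Int) < ((a - c).natAbs : Int)) && decide (a < b))) =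
      fun a b => decide (pvK c a < pvK c b) := by
    funext a b
    rw [Bool.eq_iff_iff]
    simp only [Bool.or_eq_true, Bool.and_eq_true, Bool.not_eq_eq_eq_not, Bool.not_true,
      decide_eq_true_eq, decide_eq_false_iff_not, not_lt, pvK]
    split_ifs <;> omega
  simp only [Bool.false_eq_true, if_false, hbefore]

lemma pvMerge_perm : ∀ (l r : List Int), (pvMerge l r).Perm (l ++ r) := by
  intro l
  induction l with
  | nil =>
    intro r
    induction r with
    | nil => simp [pvMerge]
    | cons b r ihr => rw [pvMerge]; simpa using ihr
  | cons a l ihl =>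
    intro r
    cases r with
    | nil => rw [pvMerge]; simpa using ihl []
    | cons b r =>
      rw [pvMerge]
      exact List.Perm.cons a (((ihl r).cons b).trans List.perm_middle.symm)

-- every element of the merged tail at distance ≥ d has key ≥ 2*d
lemma pvMerge_key_lb (c m d x : Int) (hd : 1 ≤ d)
    (hx : x ∈ pvMerge (PySem.List.pyRange (c - d) (-1) (-1)) (PySem.List.pyRange (c + d) (m + 1) 1)) :
    2 * d ≤ pvK c x := by
  have := (pvMerge_perm _ _).mem_iff.mp hx
  rw [List.mem_append, PySem.List.mem_pyRange_neg_one, PySem.List.mem_pyRange_one] at this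
  unfold pvK
  split_ifs <;> rcases this with h | h <;> omega

-- the merged list is strictly increasing under pvK c
lemma pvMerge_pairwise (c m : Int) : ∀ (n : Nat) (d : Int), 1 ≤ d →
    (c - d + 1).toNat + (m + 1 - c - d).toNat ≤ n →
    (pvMerge (PySem.List.pyRange (c - d) (-1) (-1)) (PySem.List.pyRange (c + d) (m + 1) 1)).Pairwise
      (fun a b => pvK c a < pvK c b) := by
  intro n
  induction n with
  | zero =>
    intro d hd hn
    rw [PySem.List.pyRange_neg_one_eq_nil (by omega), PySem.List.pyRange_one_eq_nil (by omega),
      pvMerge]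
    exact List.Pairwise.nil
  | succ n ih =>
    intro d hd hn
    by_cases hl : 0 ≤ c - d
    · rw [PySem.List.pyRange_neg_one_cons (by omega)]
      by_cases hr : c + d ≤ m
      · rw [PySem.List.pyRange_one_cons (by omega), pvMerge, List.pairwise_cons, List.pairwise_cons]
        have hrec : (c - d) - 1 = c - (d + 1) := by ring
        have hrec2 : (c + d) + 1 = c + (d + 1) := by ring
        rw [hrec, hrec2]
        refine ⟨?_, ?_, ih (d + 1) (by omega) (by omega)⟩
        · intro b hb
          rcases List.mem_cons.mp hb with hb | hb
          · subst hb; simp only [pvK]; split_ifs <;> omega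
          · have := pvMerge_key_lb c m (d + 1) b (by omega) hb
            simp only [pvK] at this ⊢; split_ifs at this ⊢ <;> omega
        · intro b hb
          have := pvMerge_key_lb c m (d + 1) b (by omega) hb
          simp only [pvK] at this ⊢; split_ifs at this ⊢ <;> omega
      · rw [PySem.List.pyRange_one_eq_nil (by omega), pvMerge, List.pairwise_cons]
        have hrec : (c - d) - 1 = c - (d + 1) := by ring
        have hnil : PySem.List.pyRange (c + (d + 1)) (m + 1) 1 = [] :=
          PySem.List.pyRange_one_eq_nil (by omega)
        rw [hrec, ← hnil]
        refine ⟨?_, ih (d + 1) (by omega) (by omega)⟩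
        intro b hb
        have := pvMerge_key_lb c m (d + 1) b (by omega) hb
        simp only [pvK] at this ⊢; split_ifs at this ⊢ <;> omega
    · rw [PySem.List.pyRange_neg_one_eq_nil (by omega)]
      by_cases hr : c + d ≤ m
      · rw [PySem.List.pyRange_one_cons (by omega), pvMerge, List.pairwise_cons]
        have hrec2 : (c + d) + 1 = c + (d + 1) := by ring
        have hnil : PySem.List.pyRange (c - (d + 1)) (-1) (-1) = [] :=
          PySem.List.pyRange_neg_one_eq_nil (by omega)
        rw [hrec2, ← hnil]
        refine ⟨?_, ih (d + 1) (by omega) (by omega)⟩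
        intro b hb
        have := pvMerge_key_lb c m (d + 1) b (by omega) hb
        simp only [pvK] at this ⊢; split_ifs at this ⊢ <;> omega
      · rw [PySem.List.pyRange_one_eq_nil (by omega), pvMerge]
        exact List.Pairwise.nil

-- the merged list is a strictly key-increasing rearrangement of the candidates,
-- hence IS their sort
lemma sorted_eq_merge (c m : Int) :
    PySem.List.sorted (PySem.List.pyRange 0 c ++ PySem.List.pyRange (c + 1) (m + 1)) (pvK c) =
      pvMerge (PySem.List.pyRange (c - 1) (-1) (-1)) (PySem.List.pyRange (c + 1) (m + 1) 1) := by
  apply PySem.List.sorted_eq_of_perm_of_pairwise_lt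
  · refine (pvMerge_perm _ _).trans ?_
    refine List.Perm.append ?_ (List.Perm.refl _)
    rw [PySem.List.pyRange_neg_one_eq_reverse]
    norm_num
  · exact pvMerge_pairwise c m ((c - 1 + 1).toNat + (m + 1 - c - 1).toNat) 1 (by omega) (le_refl _)

theorem get_all_nbr_idxs_spec_aux (center_i : Int) (idxs : List Int) :
    get_all_nbr_idxs center_i idxs = get_all_nbr_idxs_alt center_i idxs := by
  unfold get_all_nbr_idxs get_all_nbr_idxs_alt
  cases PySem.List.max? idxs (fun x => x) with
  | none => rfl
  | some m =>
    dsimp only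
    rw [sorted2_eq_sorted_pvK, sorted_eq_merge]
    simpa using pvLoopA_eq_merge center_i m ((center_i + 1).toNat + (m + 1 - center_i).toNat + 2)
      0 false false (by simp) (by simp) (by simp; omega)

-- ===== VERDICT (by name: the statement is the Claim_ definition above) =====
theorem get_all_nbr_idxs_spec : Claim_equal_get_all_nbr_idxs := by
  intro c idxs _ _
  exact get_all_nbr_idxs_spec_aux c idxs
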